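-- pv_equiv track=rewrite | github.com/pypi-data/pypi-mirror-357 | packages/hausify/hausify-0.1.4.tar.gz/hausify-0.1.4/hausify/util/python_import_finder.py | _merge_trailing_empty_lines
-- ===== SOURCE A (Python) =====
-- def _merge_consecutive_ranges(ranges: list[tuple[int, int]]) -> list[tuple[int, int]]:
--     """Merge consecutive ranges into single ranges."""
--     if not ranges:
--         return []
--
--     sorted_ranges = sorted(ranges, key=lambda x: x[0])
--
--     i = 0
--     merged_ranges = []
--     while i < len(sorted_ranges):
--         start = sorted_ranges[i][0]
--         end = sorted_ranges[i][1]
--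
--         j = i + 1
--         while j < len(sorted_ranges) and sorted_ranges[j][0] <= end + 1:
--             end = max(end, sorted_ranges[j][1])
--             j += 1
--
--         merged_ranges.append((start, end))
--         i = j
--
--     return merged_ranges
--
-- def _merge_trailing_empty_lines(
--     import_ranges: list[tuple[int, int]],
--     empty_line_ranges: list[tuple[int, int]],
-- ) -> list[tuple[int, int]]:
--     """Merge trailing empty lines with import ranges."""
--     if not import_ranges:
--         return []
--
--     if not empty_line_ranges:
--         return import_ranges
--
--     space_range_by_start = {start: (start, end) for start, end in empty_line_ranges}
--     space_range_by_end = {end: (start, end) for start, end in empty_line_ranges}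
--
--     merged_ranges = []
--     for start, end in import_ranges:
--
--         if start - 1 in space_range_by_end:
--             # start = space_range_by_end[start - 1][0]
--             pass
--
--         if end + 1 in space_range_by_start:
--             end = space_range_by_start[end + 1][1]
--
--         merged_ranges.append((start, end))
--
--     # Now merge any consecutive ranges
--     return _merge_consecutive_ranges(merged_ranges)
-- ===== SOURCE B (Python) =====
-- def _merge_trailing_empty_lines(
--     import_ranges: list[tuple[int, int]],
--     empty_line_ranges: list[tuple[int, int]],
-- ) -> list[tuple[int, int]]:
--     """Online interval insertion: no sort, merge each range into a maintained block list."""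
--     if not import_ranges:
--         return []
--
--     if not empty_line_ranges:
--         return import_ranges
--
--     empty_end_by_start = {s: e for s, e in empty_line_ranges}
--
--     blocks = []  # merged result so far, kept ordered by start
--     for s, e in import_ranges:
--         e = empty_end_by_start.get(e + 1, e)
--         left = [b for b in blocks if b[0] <= s]
--         right = blocks[len(left):]
--         if left and s <= left[-1][1] + 1:
--             s, e = left[-1][0], max(left[-1][1], e)
--             left.pop()
--         k = 0
--         while k < len(right) and right[k][0] <= e + 1:
--             e = max(e, right[k][1])
--             k += 1
--         blocks = left + [(s, e)] + right[k:]
--     return blocks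
-- ===== Notes on version B (the rewrite author's own statement) =====
-- stated objective: alternative
-- what changed: B drops the extend-all / sort / sweep pipeline entirely: it processes import ranges online, extending each one via the dict and immediately inserting it into a maintained list of disjoint merged blocks (split at the start, possibly fuse with the preceding block, absorb following blocks), so the sorted merged result exists at every step and no sort or separate merge pass is run.
import Mathlib
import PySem

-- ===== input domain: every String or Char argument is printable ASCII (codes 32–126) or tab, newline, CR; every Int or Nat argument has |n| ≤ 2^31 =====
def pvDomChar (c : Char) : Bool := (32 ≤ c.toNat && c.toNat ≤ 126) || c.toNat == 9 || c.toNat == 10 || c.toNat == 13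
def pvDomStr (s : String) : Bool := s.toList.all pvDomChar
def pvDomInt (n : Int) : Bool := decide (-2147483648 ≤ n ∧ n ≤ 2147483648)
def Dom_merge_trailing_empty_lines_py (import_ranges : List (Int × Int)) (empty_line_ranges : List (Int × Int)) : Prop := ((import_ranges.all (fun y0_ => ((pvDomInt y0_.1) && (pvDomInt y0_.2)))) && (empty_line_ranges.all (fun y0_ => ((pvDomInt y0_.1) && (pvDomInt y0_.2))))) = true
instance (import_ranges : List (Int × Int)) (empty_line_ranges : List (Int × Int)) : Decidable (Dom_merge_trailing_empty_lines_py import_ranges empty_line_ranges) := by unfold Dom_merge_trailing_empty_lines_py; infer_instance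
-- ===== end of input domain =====

-- B replaces A's extend-all / sort / sweep pipeline by ONLINE insertion: each extended import
-- range is merged immediately into a maintained list of disjoint blocks (no sort, no merge pass).
-- Same return value; no speed claim.

-- ===== PORT A =====
-- inner 'while j < len and sorted[j][0] <= end + 1' loop of _merge_consecutive_ranges
def pvAbsorb (e : Int) : List (Int × Int) → Int × List (Int × Int)
  | [] => (e, [])
  | (s2, e2) :: t => if s2 ≤ e + 1 then pvAbsorb (max e e2) t else (e, (s2, e2) :: t)

-- termination fact for the outer while loop (cited by pvSweep's decreasing_by)
lemma pvAbsorb_length_le (e : Int) (l : List (Int × Int)) : (pvAbsorb e l).2.length ≤ l.length := by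
  induction l generalizing e with
  | nil => simp [pvAbsorb]
  | cons p t ih =>
    obtain ⟨s2, e2⟩ := p
    simp only [pvAbsorb]
    split
    · exact ((ih _).trans (by simp))
    · simp

-- outer 'while i < len' loop with the merged_ranges accumulator
def pvSweep (acc : List (Int × Int)) : List (Int × Int) → List (Int × Int)
  | [] => acc
  | (s, e) :: rest =>
    pvSweep (acc ++ [(s, (pvAbsorb e rest).1)]) (pvAbsorb e rest).2
  termination_by l => l.length
  decreasing_by
    simp only [List.length_cons]
    exact Nat.lt_succ_of_le (pvAbsorb_length_le e rest)

def merge_consecutive_ranges_py (ranges : List (Int × Int)) : List (Int × Int) :=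
  if ranges = [] then []
  else pvSweep [] (PySem.List.sorted ranges (fun x => x.1) false)

def merge_trailing_empty_lines_py (import_ranges : List (Int × Int)) (empty_line_ranges : List (Int × Int)) : List (Int × Int) :=
  if import_ranges = [] then []
  else if empty_line_ranges = [] then import_ranges
  else
    let space_range_by_start : PySem.Dict Int (Int × Int) :=
      empty_line_ranges.foldl (fun d p => d.insert p.1 p) PySem.Dict.empty
    -- built by A but never read (its only use is a 'pass' branch)
    let _space_range_by_end : PySem.Dict Int (Int × Int) :=
      empty_line_ranges.foldl (fun d p => d.insert p.2 p) PySem.Dict.empty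
    let merged_ranges := import_ranges.foldl (fun acc p =>
      -- 'if start - 1 in space_range_by_end: pass' is a no-op and is omitted
      let e := if space_range_by_start.contains (p.2 + 1)
               then (space_range_by_start.getD (p.2 + 1) (0, 0)).2   -- guarded d[k]: default unreachable
               else p.2
      acc ++ [(p.1, e)]) []
    merge_consecutive_ranges_py merged_ranges

-- ===== PORT B =====
-- Source B's 'while k < len(right) and right[k][0] <= e + 1' absorption loop
def pvAbsorbB (e : Int) : List (Int × Int) → Int × List (Int × Int)
  | [] => (e, [])
  | (s2, e2) :: t => if s2 ≤ e + 1 then pvAbsorbB (max e e2) t else (e, (s2, e2) :: t)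

-- Source B's loop body: insert one (already extended) range into the ordered block list
def pvInsertBlock (blocks : List (Int × Int)) (p : Int × Int) : List (Int × Int) :=
  let left := blocks.filter (fun b => b.1 ≤ p.1)
  let right := blocks.drop left.length
  let seL : (Int × Int) × List (Int × Int) :=
    match left.getLast? with
    | some b => if p.1 ≤ b.2 + 1 then ((b.1, max b.2 p.2), left.dropLast) else (p, left)
    | none => (p, left)
  let r := pvAbsorbB seL.1.2 right
  seL.2 ++ [(seL.1.1, r.1)] ++ r.2

def merge_trailing_empty_lines_py_alt (import_ranges : List (Int × Int)) (empty_line_ranges : List (Int × Int)) : List (Int × Int) :=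
  if import_ranges = [] then []
  else if empty_line_ranges = [] then import_ranges
  else
    let empty_end_by_start : PySem.Dict Int Int :=
      empty_line_ranges.foldl (fun d p => d.insert p.1 p.2) PySem.Dict.empty
    import_ranges.foldl (fun blocks q =>
      pvInsertBlock blocks (q.1, empty_end_by_start.getD (q.2 + 1) q.2)) []

-- ===== PRECONDITION & SPEC =====
def Spec_merge_trailing_empty_lines_py (import_ranges : List (Int × Int)) (empty_line_ranges : List (Int × Int)) (out : List (Int × Int)) : Prop := out = merge_trailing_empty_lines_py_alt import_ranges empty_line_ranges
instance (import_ranges : List (Int × Int)) (empty_line_ranges : List (Int × Int)) (out : List (Int × Int)) : Decidable (Spec_merge_trailing_empty_lines_py import_ranges empty_line_ranges out) := by unfold Spec_merge_trailing_empty_lines_py; infer_instance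

-- ===== CLAIM (what is proved, stated in full; the proofs are below) =====
def Claim_equal_merge_trailing_empty_lines_py : Prop := ∀ (import_ranges : List (Int × Int)) (empty_line_ranges : List (Int × Int)), Dom_merge_trailing_empty_lines_py import_ranges empty_line_ranges → Spec_merge_trailing_empty_lines_py import_ranges empty_line_ranges (merge_trailing_empty_lines_py import_ranges empty_line_ranges)

-- ===== LEMMAS AND PROOFS =====

-- accumulator-free form of A's sweep
def pvSweep' : List (Int × Int) → List (Int × Int)
  | [] => []
  | (s, e) :: rest => (s, (pvAbsorb e rest).1) :: pvSweep' (pvAbsorb e rest).2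
  termination_by l => l.length
  decreasing_by
    simp only [List.length_cons]
    exact Nat.lt_succ_of_le (pvAbsorb_length_le e rest)

lemma pvSweep_eq_sweep' (l acc : List (Int × Int)) : pvSweep acc l = acc ++ pvSweep' l := by
  induction l using pvSweep'.induct generalizing acc with
  | case1 => simp [pvSweep, pvSweep']
  | case2 s e rest ih =>
    rw [pvSweep, pvSweep', ih]
    simp

-- B's absorption loop is the same loop as A's inner while
lemma pvAbsorbB_eq (e : Int) (l : List (Int × Int)) : pvAbsorbB e l = pvAbsorb e l := by
  induction l generalizing e with
  | nil => rfl
  | cons p t ih => obtain ⟨s2, e2⟩ := p; simp only [pvAbsorbB, pvAbsorb, ih]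

lemma pvAbsorb_le (e : Int) (l : List (Int × Int)) : e ≤ (pvAbsorb e l).1 := by
  induction l generalizing e with
  | nil => simp [pvAbsorb]
  | cons p t ih =>
    obtain ⟨s2, e2⟩ := p
    simp only [pvAbsorb]
    split
    · exact le_trans (le_max_left e e2) (ih _)
    · simp

lemma pvAbsorb_sublist (e : Int) (l : List (Int × Int)) : (pvAbsorb e l).2.Sublist l := by
  induction l generalizing e with
  | nil => simp [pvAbsorb]
  | cons p t ih =>
    obtain ⟨s2, e2⟩ := p
    simp only [pvAbsorb]
    split
    · exact ((ih _).trans (List.sublist_cons_self _ _))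
    · simp

-- absorbing with a larger seed passes through what was already absorbed
lemma pvAbsorb_chain (l : List (Int × Int)) (m c : Int) :
    pvAbsorb (max m c) l = pvAbsorb (max m (pvAbsorb c l).1) (pvAbsorb c l).2 := by
  induction l generalizing c with
  | nil => simp [pvAbsorb]
  | cons p t ih =>
    obtain ⟨s2, e2⟩ := p
    simp only [pvAbsorb]
    by_cases h : s2 ≤ c + 1
    · rw [if_pos h, if_pos (by have := le_max_right m c; omega)]
      rw [max_assoc]
      exact ih (max c e2)
    · rw [if_neg h]
      simp [pvAbsorb]

-- every element left unabsorbed starts beyond the absorbed end + 1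
lemma pvAbsorb_rest_gt (l : List (Int × Int)) (c : Int)
    (hs : l.Pairwise (fun a b => a.1 ≤ b.1)) :
    ∀ x ∈ (pvAbsorb c l).2, (pvAbsorb c l).1 + 1 < x.1 := by
  induction l generalizing c with
  | nil => simp [pvAbsorb]
  | cons p t ih =>
    obtain ⟨s2, e2⟩ := p
    rw [List.pairwise_cons] at hs
    simp only [pvAbsorb]
    by_cases h : s2 ≤ c + 1
    · rw [if_pos h]; exact ih _ hs.2
    · rw [if_neg h]
      intro x hx
      rcases List.mem_cons.mp hx with rfl | hx
      · omega
      · have := hs.1 x hx; omega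

-- block starts of the sweep are starts of elements
lemma pvSweep'_fst_mem (l : List (Int × Int)) :
    ∀ q ∈ pvSweep' l, q.1 ∈ l.map Prod.fst := by
  induction l using pvSweep'.induct with
  | case1 => simp [pvSweep']
  | case2 s e rest ih =>
    intro q hq
    rw [pvSweep'] at hq
    rcases List.mem_cons.mp hq with rfl | hq
    · simp
    · have := ih q hq
      have hsub := (pvAbsorb_sublist e rest).map Prod.fst
      simp only [List.map_cons]
      exact List.mem_cons_of_mem _ (hsub.mem this)

-- absorbing over the block list equals absorbing over the raw sorted list
lemma pvAbsorb_blocks (l : List (Int × Int)) (c : Int)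
    (hs : l.Pairwise (fun a b => a.1 ≤ b.1)) :
    pvAbsorb c (pvSweep' l) = ((pvAbsorb c l).1, pvSweep' (pvAbsorb c l).2) := by
  induction l using pvSweep'.induct generalizing c with
  | case1 => simp [pvSweep', pvAbsorb]
  | case2 s e rest ih =>
    rw [List.pairwise_cons] at hs
    have hrest : (pvAbsorb e rest).2.Pairwise (fun a b => a.1 ≤ b.1) :=
      hs.2.sublist (pvAbsorb_sublist e rest)
    rw [pvSweep']
    simp only [pvAbsorb]
    by_cases h : s ≤ c + 1
    · rw [if_pos h, if_pos h, ih (max c (pvAbsorb e rest).1) hrest, pvAbsorb_chain rest c e]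
    · rw [if_neg h, if_neg h, ← pvSweep']

-- stable insertion of one element (insertBy unfolded to equations)
def pvIns (p : Int × Int) : List (Int × Int) → List (Int × Int)
  | [] => [p]
  | b :: t => if p.1 < b.1 then p :: b :: t else b :: pvIns p t

lemma pvIns_eq_insertBy (p : Int × Int) (l : List (Int × Int)) :
    pvIns p l = PySem.List.insertBy (fun a b => decide (a.1 < b.1)) p l := by
  induction l with
  | nil => rfl
  | cons b t ih => simp only [pvIns, PySem.List.insertBy, ih]; split <;> simp_all

-- inserting a late element does not disturb an absorption it lies beyond
lemma pvAbsorb_ins_gt (p : Int × Int) (l : List (Int × Int)) (c : Int)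
    (h : (pvAbsorb c l).1 + 1 < p.1) :
    pvAbsorb c (pvIns p l) = ((pvAbsorb c l).1, pvIns p (pvAbsorb c l).2) := by
  induction l generalizing c with
  | nil =>
    simp only [pvAbsorb] at h ⊢
    simp [pvIns, pvAbsorb, show ¬ p.1 ≤ c + 1 by omega]
  | cons q t ih =>
    obtain ⟨s2, e2⟩ := q
    by_cases hq : p.1 < s2
    · -- p is inserted in front
      have hc : c ≤ (pvAbsorb c ((s2, e2) :: t)).1 := pvAbsorb_le _ _
      simp only [pvIns, if_pos hq]
      by_cases hc2 : s2 ≤ c + 1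
      · -- the head would be absorbed, contradiction with h
        exfalso
        have h1 : pvAbsorb c ((s2, e2) :: t) = pvAbsorb (max c e2) t := by
          simp [pvAbsorb, hc2]
        rw [h1] at h
        have := pvAbsorb_le (max c e2) t
        have := le_max_left c e2
        omega
      · have h1 : pvAbsorb c ((s2, e2) :: t) = (c, (s2, e2) :: t) := by
          simp [pvAbsorb, hc2]
        rw [h1] at h ⊢
        simp [pvAbsorb, show ¬ p.1 ≤ c + 1 by omega, pvIns, hq]
    · simp only [pvIns, if_neg hq]
      simp only [pvAbsorb]
      by_cases hc2 : s2 ≤ c + 1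
      · rw [if_pos hc2]
        have h' : (pvAbsorb (max c e2) t).1 + 1 < p.1 := by
          have h1 : pvAbsorb c ((s2, e2) :: t) = pvAbsorb (max c e2) t := by
            simp [pvAbsorb, hc2]
          rw [h1] at h; exact h
        rw [ih _ h']
        simp [hc2]
      · simp only [if_neg hc2]
        simp [pvIns, hq]

-- inserting an element that touches the absorbed chunk joins it and re-absorbs the rest
lemma pvAbsorb_ins_le (p : Int × Int) (l : List (Int × Int)) (c : Int)
    (h : p.1 ≤ (pvAbsorb c l).1 + 1) :
    pvAbsorb c (pvIns p l) = pvAbsorb (max (pvAbsorb c l).1 p.2) (pvAbsorb c l).2 := by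
  induction l generalizing c with
  | nil =>
    simp only [pvAbsorb] at h ⊢
    simp [pvIns, pvAbsorb, show p.1 ≤ c + 1 from h]
  | cons q t ih =>
    obtain ⟨s2, e2⟩ := q
    by_cases hq : p.1 < s2
    · -- p is inserted in front; p itself is absorbed at once
      have hc1 : p.1 ≤ c + 1 := by
        by_cases hc2 : s2 ≤ c + 1
        · omega
        · have h1 : pvAbsorb c ((s2, e2) :: t) = (c, (s2, e2) :: t) := by
            simp [pvAbsorb, hc2]
          rw [h1] at h; exact h
      simp only [pvIns, if_pos hq]
      have h2 : pvAbsorb c (p :: (s2, e2) :: t) = pvAbsorb (max c p.2) ((s2, e2) :: t) := by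
        obtain ⟨p1, p2⟩ := p
        simp [pvAbsorb, hc1]
      rw [h2]
      have := pvAbsorb_chain ((s2, e2) :: t) p.2 c
      rw [max_comm p.2 c, max_comm p.2 (pvAbsorb c ((s2, e2) :: t)).1] at this
      exact this
    · simp only [pvIns, if_neg hq]
      simp only [pvAbsorb]
      by_cases hc2 : s2 ≤ c + 1
      · simp only [if_pos hc2]
        have h1 : pvAbsorb c ((s2, e2) :: t) = pvAbsorb (max c e2) t := by
          simp [hc2, pvAbsorb]
        rw [h1] at h
        exact ih _ h
      · -- head not absorbed: then p.1 ≤ c+1 but s2 ≤ p.1, contradiction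
        exfalso
        have h1 : pvAbsorb c ((s2, e2) :: t) = (c, (s2, e2) :: t) := by
          simp [pvAbsorb, hc2]
        rw [h1] at h
        omega

-- peeling an untouched leading block off an insertion
lemma pvInsertBlock_cons (b p : Int × Int) (B : List (Int × Int))
    (h1 : b.1 ≤ p.1) (h2 : b.2 + 1 < p.1) :
    pvInsertBlock (b :: B) p = b :: pvInsertBlock B p := by
  simp only [pvInsertBlock]
  rw [List.filter_cons_of_pos (by simpa using h1)]
  rcases hF : B.filter (fun x => decide (x.1 ≤ p.1)) with _ | ⟨f, F'⟩
  · simp [hF, show ¬ p.1 ≤ b.2 + 1 by omega]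
  · rw [hF]
    have hgl : (b :: f :: F').getLast? = (f :: F').getLast? := List.getLast?_cons_cons ..
    rw [hgl]
    rcases hgl2 : (f :: F').getLast? with _ | q
    · simp at hgl2
    · simp only []
      split
      · simp [List.dropLast_cons_of_ne_nil (by simp : f :: F' ≠ [])]
      · simp

-- THE CORE LEMMA: online insertion commutes with sweep over the stably sorted list
lemma pvSweep'_ins (p : Int × Int) : ∀ (n : Nat) (L : List (Int × Int)), L.length ≤ n →
    L.Pairwise (fun a b => a.1 ≤ b.1) →
    pvSweep' (pvIns p L) = pvInsertBlock (pvSweep' L) p := by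
  intro n
  induction n with
  | zero =>
    intro L hL _
    rw [List.length_eq_zero_iff.mp (Nat.le_zero.mp hL)]
    obtain ⟨p1, p2⟩ := p
    simp [pvIns, pvSweep', pvAbsorb, pvInsertBlock, pvAbsorbB]
  | succ n ih =>
    intro L hL hpw
    rcases L with _ | ⟨⟨s, e⟩, t⟩
    · obtain ⟨p1, p2⟩ := p
      simp [pvIns, pvSweep', pvAbsorb, pvInsertBlock, pvAbsorbB]
    rw [List.pairwise_cons] at hpw
    have hrest : (pvAbsorb e t).2.Pairwise (fun a b => a.1 ≤ b.1) :=
      hpw.2.sublist (pvAbsorb_sublist e t)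
    by_cases hs : s ≤ p.1
    · have hins : pvIns p ((s, e) :: t) = (s, e) :: pvIns p t := by
        simp [pvIns, show ¬ p.1 < s by omega]
      by_cases hj : p.1 ≤ (pvAbsorb e t).1 + 1
      · -- p joins the first block
        rw [hins, pvSweep', pvAbsorb_ins_le p t e hj]
        -- right-hand side
        conv_rhs => rw [pvSweep']
        have hfilter : (pvSweep' (pvAbsorb e t).2).filter (fun x => decide (x.1 ≤ p.1)) = [] := by
          rw [List.filter_eq_nil_iff]
          intro q hq
          have hqm := pvSweep'_fst_mem _ q hq
          rw [List.mem_map] at hqm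
          obtain ⟨x, hx, hxq⟩ := hqm
          have := pvAbsorb_rest_gt t e hpw.2 x hx
          simp only [decide_eq_true_eq]
          omega
        simp only [pvInsertBlock]
        rw [List.filter_cons_of_pos (by simpa using hs), hfilter]
        simp only [List.getLast?_singleton]
        rw [if_pos hj]
        simp only [show ([((s, e).1, (pvAbsorb e t).1)] : List (Int × Int)).dropLast = [] from rfl,
          List.length_cons, List.length_nil, List.drop_succ_cons, List.drop_zero]
        rw [pvAbsorbB_eq, pvAbsorb_blocks _ _ hrest]
        simp
      · -- p starts after the first block
        rw [hins, pvSweep', pvAbsorb_ins_gt p t e (by omega)]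
        simp only []
        have hlen : (pvAbsorb e t).2.length ≤ n := by
          have := pvAbsorb_length_le e t
          simp only [List.length_cons] at hL
          omega
        rw [ih _ hlen hrest]
        conv_rhs => rw [pvSweep']
        rw [pvInsertBlock_cons _ _ _ (by simpa using hs) (by simpa using hj : _ + 1 < p.1)]
    · -- p goes in front of everything
      have hins : pvIns p ((s, e) :: t) = p :: (s, e) :: t := by
        simp [pvIns, show p.1 < s by omega]
      rw [hins, pvSweep']
      have hfilter : (pvSweep' ((s, e) :: t)).filter (fun x => decide (x.1 ≤ p.1)) = [] := by
        rw [List.filter_eq_nil_iff]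
        intro q hq
        have hqm := pvSweep'_fst_mem _ q hq
        rw [List.mem_map] at hqm
        obtain ⟨x, hx, hxq⟩ := hqm
        have hxs : s ≤ x.1 := by
          rcases List.mem_cons.mp hx with rfl | hx
          · simp
          · exact hpw.1 x hx
        simp only [decide_eq_true_eq]
        omega
      simp only [pvInsertBlock]
      rw [hfilter]
      simp only [List.getLast?_nil, List.length_nil, List.drop_zero]
      rw [pvAbsorbB_eq, pvAbsorb_blocks _ _ (List.pairwise_cons.mpr hpw)]
      simp

-- folding online insertion equals sweeping the stably sorted list
lemma pvFoldl_insert_eq (Y : List (Int × Int)) :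
    Y.foldl pvInsertBlock [] = pvSweep' (PySem.List.sorted Y (fun r => r.1) false) := by
  induction Y using List.reverseRecOn with
  | nil => simp [pvSweep', PySem.List.sorted_eq_foldl_insertBy]
  | append_singleton Y p ih =>
    rw [List.foldl_append, List.foldl_cons, List.foldl_nil, ih]
    rw [PySem.List.sorted_eq_foldl_insertBy (Y ++ [p]), List.foldl_append, List.foldl_cons,
      List.foldl_nil, ← PySem.List.sorted_eq_foldl_insertBy, ← pvIns_eq_insertBy]
    exact (pvSweep'_ins p (PySem.List.sorted Y (fun r => r.1) false).length _ le_rfl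
      (PySem.List.sorted_pairwise _ _)).symm

-- the two extension dicts agree: A stores the whole pair under the start, B stores just the end
lemma pvDict_rel (l : List (Int × Int)) (d1 : PySem.Dict Int (Int × Int)) (d2 : PySem.Dict Int Int)
    (h : ∀ k, ((d1.get? k).map Prod.snd) = d2.get? k) (k : Int) :
    (((l.foldl (fun d p => d.insert p.1 p) d1).get? k).map Prod.snd)
      = (l.foldl (fun d p => d.insert p.1 p.2) d2).get? k := by
  induction l generalizing d1 d2 with
  | nil => exact h k
  | cons p t ih =>
    simp only [List.foldl_cons]
    refine ih _ _ (fun j => ?_)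
    rw [PySem.Dict.get?_insert, PySem.Dict.get?_insert]
    split
    · rfl
    · exact h j

-- A's guarded lookup equals B's .get with default
lemma pvExt_eq (l : List (Int × Int)) (e : Int) :
    (if (l.foldl (fun d p => d.insert p.1 p) PySem.Dict.empty).contains (e + 1)
     then ((l.foldl (fun d p => d.insert p.1 p) PySem.Dict.empty).getD (e + 1) (0, 0)).2
     else e)
      = (l.foldl (fun d p => d.insert p.1 p.2) PySem.Dict.empty).getD (e + 1) e := by
  have h := pvDict_rel l PySem.Dict.empty PySem.Dict.empty (by simp) (e + 1)
  rw [PySem.Dict.contains_eq_isSome_get?, PySem.Dict.getD_eq_get?_getD, PySem.Dict.getD_eq_get?_getD, ← h]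
  cases (l.foldl (fun d p => d.insert p.1 p) PySem.Dict.empty).get? (e + 1) <;> simp

-- ===== VERDICT (by name: the statement is the Claim_ definition above) =====
theorem merge_trailing_empty_lines_py_spec : Claim_equal_merge_trailing_empty_lines_py := by
  intro ir er _
  unfold Spec_merge_trailing_empty_lines_py
  unfold merge_trailing_empty_lines_py merge_trailing_empty_lines_py_alt
  by_cases h1 : ir = []
  · simp [h1]
  by_cases h2 : er = []
  · simp [h1, h2]
  rw [if_neg h1, if_neg h2, if_neg h1, if_neg h2]
  simp only []
  -- the extended lists coincide
  have hext : ir.foldl (fun acc p =>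
        acc ++ [(p.1, if (er.foldl (fun d p => d.insert p.1 p) PySem.Dict.empty).contains (p.2 + 1)
                      then ((er.foldl (fun d p => d.insert p.1 p) PySem.Dict.empty).getD (p.2 + 1) (0, 0)).2
                      else p.2)]) []
      = ir.map (fun p => (p.1, (er.foldl (fun d p => d.insert p.1 p.2) PySem.Dict.empty).getD (p.2 + 1) p.2)) := by
    rw [PySem.List.foldl_append_singleton_eq_map]
    exact List.map_congr_left (fun p _ => by rw [pvExt_eq er p.2])
  rw [hext]
  -- B's per-element extension is a fold over the extended list
  have hB : ir.foldl (fun blocks q =>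
        pvInsertBlock blocks (q.1, (er.foldl (fun d p => d.insert p.1 p.2) PySem.Dict.empty).getD (q.2 + 1) q.2)) []
      = (ir.map (fun p => (p.1, (er.foldl (fun d p => d.insert p.1 p.2) PySem.Dict.empty).getD (p.2 + 1) p.2))).foldl pvInsertBlock [] := by
    rw [List.foldl_map]
  rw [hB, pvFoldl_insert_eq]
  unfold merge_consecutive_ranges_py
  rw [if_neg (by simp [h1])]
  rw [pvSweep_eq_sweep']
  simp
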